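-- pv_equiv track=rewrite | github.com/aryanf/WindowsRunTool | python/run.py | find_and_remove_operator
-- ===== SOURCE A (Python) =====
-- def find_and_remove_operator(input_list):
--     operator = 'and'
--     new_list = []
--     for item in input_list:
--         if item == 'or':
--             operator = 'or'
--         elif item == 'and':
--             operator = 'and'
--         else:
--             new_list.append(item)
--     return operator, new_list
-- ===== SOURCE B (Python) =====
-- def find_and_remove_operator(input_list):
--     operator = next((x for x in reversed(input_list) if x in ('and', 'or')), 'and')
--     new_list = [x for x in input_list if x not in ('and', 'or')]
--     return operator, new_list
-- ===== Notes on version B (the rewrite author's own statement) =====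
-- stated objective: simpler
-- what changed: Replaces the single stateful loop with two independent passes: a right-to-left short-circuit search for the last keyword (the one that sticks in A) and a separate filter removing the keywords.
import Mathlib
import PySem

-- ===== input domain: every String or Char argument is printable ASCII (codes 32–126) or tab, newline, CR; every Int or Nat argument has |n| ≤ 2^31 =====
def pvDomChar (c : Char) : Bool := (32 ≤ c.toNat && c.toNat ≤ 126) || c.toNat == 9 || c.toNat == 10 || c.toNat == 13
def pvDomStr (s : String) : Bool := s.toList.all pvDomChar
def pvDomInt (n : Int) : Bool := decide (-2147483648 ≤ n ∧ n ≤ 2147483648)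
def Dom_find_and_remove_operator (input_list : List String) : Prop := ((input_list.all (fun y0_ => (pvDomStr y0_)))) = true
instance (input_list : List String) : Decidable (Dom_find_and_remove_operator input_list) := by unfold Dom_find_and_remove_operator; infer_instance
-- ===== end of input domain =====

-- ===== PORT A =====
-- port of A: one stateful fold over the list, carrying (operator, new_list)
def faroStep (s : String × List String) (item : String) : String × List String :=
  if item == "or" then ("or", s.2)
  else if item == "and" then ("and", s.2)
  else (s.1, s.2 ++ [item])

def find_and_remove_operator (input_list : List String) : String × List String :=
  input_list.foldl faroStep ("and", [])

-- ===== PORT B =====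
-- port of B: right-to-left short-circuit search for the last keyword, plus a separate filter
def find_and_remove_operator_alt (input_list : List String) : String × List String :=
  ((input_list.reverse.find? (fun x => x == "and" || x == "or")).getD "and",
   input_list.filter (fun x => !(x == "and" || x == "or")))

-- ===== PRECONDITION & SPEC =====
def Spec_find_and_remove_operator (input_list : List String) (out : String × List String) : Prop := out = find_and_remove_operator_alt input_list
instance (input_list : List String) (out : String × List String) : Decidable (Spec_find_and_remove_operator input_list out) := by unfold Spec_find_and_remove_operator; infer_instance

-- ===== CLAIM (what is proved, stated in full; the proofs are below) =====
def Claim_equal_find_and_remove_operator : Prop := ∀ (input_list : List String), Dom_find_and_remove_operator input_list → Spec_find_and_remove_operator input_list (find_and_remove_operator input_list)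

-- ===== LEMMAS AND PROOFS =====

theorem faro_foldl (l : List String) (op : String) (acc : List String) :
    l.foldl faroStep (op, acc) =
      ((l.reverse.find? (fun x => x == "and" || x == "or")).getD op,
       acc ++ l.filter (fun x => !(x == "and" || x == "or"))) := by
  induction l generalizing op acc with
  | nil => simp
  | cons x xs ih =>
    simp only [List.foldl_cons, List.reverse_cons, List.filter_cons, faroStep]
    by_cases hor : x == "or"
    · simp [(eq_of_beq hor).symm, ih, List.find?_append]
    · by_cases hand : x == "and"
      · simp [hor, (eq_of_beq hand).symm, ih, List.find?_append]
      · simp [hor, hand, ih, List.find?_append]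

-- ===== VERDICT (by name: the statement is the Claim_ definition above) =====
theorem find_and_remove_operator_spec : Claim_equal_find_and_remove_operator := by
  intro l _
  unfold Spec_find_and_remove_operator find_and_remove_operator find_and_remove_operator_alt
  simp [faro_foldl]
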